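-- pv_equiv track=rewrite | github.com/maniwaroka/thermalright-trcc-linux-multipleGPU | src/trcc/adapters/device/adapter_scsi.py | _get_frame_chunks
-- ===== SOURCE A (Python) =====
-- _FRAME_CMD_BASE = 0x101F5
--
-- _CHUNK_SIZE_LARGE = 0x10000  # 64 KiB per chunk for large displays (320x320+)
--
-- _CHUNK_SIZE_SMALL = 0xE100   # 57,600 bytes per chunk for small displays (≤320x240)
--
-- _SMALL_DISPLAY_PIXELS = 76800
--
-- def _get_frame_chunks(width: int, height: int) -> list:
--     """Calculate frame chunk commands for a given resolution.
--
--     USBLCD.exe uses different chunk sizes per resolution mode: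
--       Mode 1/2 (≤320x240): 0xE100 (57,600) byte chunks
--       Mode 3   (320x320+): 0x10000 (65,536) byte chunks
--
--     For 240x240: 2 chunks (2×0xE100 = 115,200 bytes)
--     For 320x240: 3 chunks (2×0xE100 + 0x9600 = 153,600 bytes)
--     For 320x320: 4 chunks (3×0x10000 + 0x2000 = 204,800 bytes)
--     For 480x480: 8 chunks (7×0x10000 + 0x2800 = 460,800 bytes)
--     """
--     pixels = width * height
--     chunk_size = (_CHUNK_SIZE_SMALL if pixels <= _SMALL_DISPLAY_PIXELS
--                   else _CHUNK_SIZE_LARGE)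
--     total = pixels * 2  # RGB565: 2 bytes per pixel
--     chunks = []
--     offset = 0
--     idx = 0
--     while offset < total:
--         size = min(chunk_size, total - offset)
--         cmd = _FRAME_CMD_BASE | (idx << 24)
--         chunks.append((cmd, size))
--         offset += size
--         idx += 1
--     return chunks
-- ===== SOURCE B (Python) =====
-- _FRAME_CMD_BASE = 0x101F5
-- _CHUNK_SIZE_LARGE = 0x10000
-- _CHUNK_SIZE_SMALL = 0xE100
-- _SMALL_DISPLAY_PIXELS = 76800
--
-- def _get_frame_chunks(width: int, height: int) -> list:
--     pixels = width * height
--     chunk_size = (_CHUNK_SIZE_SMALL if pixels <= _SMALL_DISPLAY_PIXELS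
--                   else _CHUNK_SIZE_LARGE)
--     total = pixels * 2
--     if total <= 0:
--         return []
--     # Stage 1: build the list of chunk sizes in closed form (no loop):
--     # q full chunks plus one remainder chunk if the division is not exact.
--     q, r = divmod(total, chunk_size)
--     sizes = [chunk_size] * q + ([r] if r else [])
--     # Stage 2: attach the per-chunk command header by enumeration.
--     return [(_FRAME_CMD_BASE | (idx << 24), size) for idx, size in enumerate(sizes)]
-- ===== Notes on version B (the rewrite author's own statement) =====
-- stated objective: alternative
-- what changed: Instead of A's single while-loop that walks an offset accumulator and cuts one chunk per iteration, B builds the whole size list in closed form via divmod and list repetition ([chunk_size]*q plus an optional remainder) and then attaches command headers with enumerate in a second stage.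
import Mathlib
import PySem

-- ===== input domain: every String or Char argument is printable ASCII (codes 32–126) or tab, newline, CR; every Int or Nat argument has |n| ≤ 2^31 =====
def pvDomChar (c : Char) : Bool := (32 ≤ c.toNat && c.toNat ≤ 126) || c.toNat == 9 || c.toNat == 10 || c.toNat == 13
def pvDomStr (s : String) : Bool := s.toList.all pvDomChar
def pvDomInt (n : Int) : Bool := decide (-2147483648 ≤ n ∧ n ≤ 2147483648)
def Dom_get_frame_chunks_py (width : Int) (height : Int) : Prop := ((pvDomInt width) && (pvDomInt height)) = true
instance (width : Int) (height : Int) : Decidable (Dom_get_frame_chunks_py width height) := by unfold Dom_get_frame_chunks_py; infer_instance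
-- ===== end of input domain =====

-- B replaces A's offset-accumulating while loop by a two-stage construction:
-- the chunk-size list is built in closed form with divmod and list repetition,
-- then headers are attached by enumeration (objective: alternative).

-- ===== PORT A =====
-- A's while loop; the '0 < cs' conjunct is only a totality guard (cs is always
-- 0xE100 or 0x10000 at the call sites, so it never changes the computation).
def get_frame_chunks_loop (total cs offset idx : Int) : List (Int × Int) :=
  if h : 0 < cs ∧ offset < total then
    (PySem.Int.bor 0x101F5 (idx <<< (24 : Nat)), min cs (total - offset)) ::
      get_frame_chunks_loop total cs (offset + min cs (total - offset)) (idx + 1)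
  else []
termination_by (total - offset).toNat
decreasing_by omega

def get_frame_chunks_py (width : Int) (height : Int) : List (Int × Int) :=
  let pixels := width * height
  let chunk_size : Int := if pixels ≤ 76800 then 0xE100 else 0x10000
  let total := pixels * 2
  get_frame_chunks_loop total chunk_size 0 0

-- ===== PORT B =====
def get_frame_chunks_py_alt (width : Int) (height : Int) : List (Int × Int) :=
  let pixels := width * height
  let chunk_size : Int := if pixels ≤ 76800 then 0xE100 else 0x10000
  let total := pixels * 2
  if total ≤ 0 then []
  else
    let q := PySem.Int.floordiv total chunk_size
    let r := PySem.Int.mod total chunk_size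
    let sizes := List.replicate q.toNat chunk_size ++ (if r ≠ 0 then [r] else [])
    (PySem.List.enumerate sizes 0).map (fun (p : Int × Int) =>
      (PySem.Int.bor 0x101F5 (p.1 <<< (24 : Nat)), p.2))

-- ===== PRECONDITION & SPEC =====
def Spec_get_frame_chunks_py (width : Int) (height : Int) (out : List (Int × Int)) : Prop := out = get_frame_chunks_py_alt width height
instance (width : Int) (height : Int) (out : List (Int × Int)) : Decidable (Spec_get_frame_chunks_py width height out) := by unfold Spec_get_frame_chunks_py; infer_instance

-- ===== CLAIM (what is proved, stated in full; the proofs are below) =====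
def Claim_equal_get_frame_chunks_py : Prop := ∀ (width : Int) (height : Int), Dom_get_frame_chunks_py width height → Spec_get_frame_chunks_py width height (get_frame_chunks_py width height)

-- ===== LEMMAS AND PROOFS =====

-- A's loop started at offset i*cs produces one chunk per index i..n-1, where
-- n is the ceiling-division chunk count.
theorem loop_eq_map (total cs : Int) (hcs : 0 < cs) :
    ∀ idx : Int,
      get_frame_chunks_loop total cs (idx * cs) idx =
        (PySem.List.pyRange idx ((total + cs - 1) / cs) 1).map (fun (i : Int) =>
          (PySem.Int.bor 0x101F5 (i <<< (24 : Nat)), min cs (total - i * cs))) := by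
  intro idx
  set n := (total + cs - 1) / cs with hn
  have hiff : ∀ i : Int, i < n ↔ i * cs < total := by
    intro i
    rw [hn]
    constructor
    · intro h
      have h' : i + 1 ≤ (total + cs - 1) / cs := by omega
      have := (Int.le_ediv_iff_mul_le hcs).mp h'
      nlinarith
    · intro h
      have h' : (i + 1) * cs ≤ total + cs - 1 := by nlinarith
      have := (Int.le_ediv_iff_mul_le hcs).mpr h'
      omega
  have key : ∀ m : Nat, ∀ i : Int, (n - i).toNat ≤ m →
      get_frame_chunks_loop total cs (i * cs) i =
        (PySem.List.pyRange i n 1).map (fun (j : Int) =>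
          (PySem.Int.bor 0x101F5 (j <<< (24 : Nat)), min cs (total - j * cs))) := by
    intro m
    induction m with
    | zero =>
      intro i him
      have hni : n ≤ i := by omega
      have : ¬ i * cs < total := by rw [← hiff]; omega
      rw [get_frame_chunks_loop, PySem.List.pyRange_one_eq_nil hni]
      simp [this]
    | succ m ih =>
      intro i him
      by_cases hlt : i * cs < total
      · have hi : i < n := (hiff i).mpr hlt
        rw [get_frame_chunks_loop]
        rw [dif_pos ⟨hcs, hlt⟩]
        rw [PySem.List.pyRange_one_cons hi, List.map_cons]
        congr 1
        by_cases hbig : cs ≤ total - i * cs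
        · have hoff : i * cs + min cs (total - i * cs) = (i + 1) * cs := by
            rw [min_eq_left hbig]; ring
          rw [hoff]
          exact ih (i + 1) (by omega)
        · have hoff : i * cs + min cs (total - i * cs) = total := by omega
          have hend : n ≤ i + 1 := by
            by_contra hc
            have : (i + 1) * cs < total := (hiff (i + 1)).mp (by omega)
            nlinarith
          rw [hoff, get_frame_chunks_loop, PySem.List.pyRange_one_eq_nil hend]
          simp
      · have hni : n ≤ i := by rw [← not_lt, hiff]; omega
        rw [get_frame_chunks_loop, PySem.List.pyRange_one_eq_nil hni]
        simp [hlt]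
  exact key (n - idx).toNat idx le_rfl

-- B's enumerated size list (q full chunks + optional remainder) equals the
-- index-range form that A's loop produces, when total = q*cs + r, 0 ≤ r < cs.
theorem enum_eq_map (cs q r : Int) (hcs : 0 < cs) (hq : 0 ≤ q)
    (hr0 : 0 ≤ r) (hrc : r < cs) :
    (PySem.List.enumerate (List.replicate q.toNat cs ++ (if r ≠ 0 then [r] else [])) 0).map
        (fun (p : Int × Int) => (PySem.Int.bor 0x101F5 (p.1 <<< (24 : Nat)), p.2)) =
      (PySem.List.pyRange 0 ((q * cs + r + cs - 1) / cs) 1).map (fun (i : Int) =>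
        (PySem.Int.bor 0x101F5 (i <<< (24 : Nat)), min cs (q * cs + r - i * cs))) := by
  have hn : (q * cs + r + cs - 1) / cs = if r ≠ 0 then q + 1 else q := by
    by_cases h : r = 0
    · subst h
      rw [if_neg (show ¬((0:Int) ≠ 0) by omega)]
      have : q * cs + 0 + cs - 1 = (cs - 1) + q * cs := by ring
      rw [this, Int.add_mul_ediv_right _ _ (by omega), Int.ediv_eq_zero_of_lt (by omega) (by omega)]
      omega
    · simp only [if_pos h]
      have : q * cs + r + cs - 1 = (r - 1) + (q + 1) * cs := by ring
      rw [this, Int.add_mul_ediv_right _ _ (by omega), Int.ediv_eq_zero_of_lt (by omega) (by omega)]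
      omega
  rw [hn]
  have hlen : (List.replicate q.toNat cs ++ (if r ≠ 0 then [r] else [])).length =
      q.toNat + (if r ≠ 0 then 1 else 0) := by
    by_cases h : r = 0 <;> simp [h]
  apply List.ext_getElem
  · rw [List.length_map, List.length_map, PySem.List.length_enumerate, hlen,
      PySem.List.length_pyRange_one]
    by_cases h : r = 0
    · rw [if_neg (by simpa using h), if_neg (by simpa using h)]; omega
    · rw [if_pos h, if_pos h]; omega
  · intro k hk1 hk2
    rw [List.length_map, PySem.List.length_enumerate, hlen] at hk1
    simp only [List.getElem_map, PySem.List.getElem_enumerate, PySem.List.getElem_pyRange_one]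
    by_cases hkq : k < q.toNat
    · rw [List.getElem_append_left (by simpa using hkq), List.getElem_replicate]
      have hle : cs ≤ q * cs + r - (0 + (k : Int)) * cs := by
        nlinarith [mul_nonneg (show (0:Int) ≤ q - (k : Int) - 1 by omega) hcs.le]
      rw [min_eq_left hle]
    · have hr : r ≠ 0 := by
        by_contra h; rw [if_neg (by simpa using h)] at hk1; omega
      have hkq' : k = q.toNat := by rw [if_pos hr] at hk1; omega
      rw [List.getElem_append_right (by simpa using hkq)]
      simp only [if_pos hr]
      have e1 : q * cs + r - (0 + (k : Int)) * cs = r := by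
        have hq' : ((k : Int)) = q := by omega
        rw [hq']; ring
      rw [e1, min_eq_right hrc.le]
      simp [hkq']

-- ===== VERDICT (by name: the statement is the Claim_ definition above) =====
theorem get_frame_chunks_py_spec : Claim_equal_get_frame_chunks_py := by
  intro width height _
  unfold Spec_get_frame_chunks_py get_frame_chunks_py get_frame_chunks_py_alt
  dsimp only
  set pixels := width * height with hp
  set cs : Int := if pixels ≤ 76800 then 0xE100 else 0x10000 with hcsdef
  have hcs : 0 < cs := by rw [hcsdef]; split <;> norm_num
  set total := pixels * 2 with ht
  by_cases hpos : total ≤ 0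
  · rw [if_pos hpos, get_frame_chunks_loop]
    simp [show ¬ (0 < cs ∧ (0:Int) < total) by omega]
  · rw [if_neg hpos]
    rw [PySem.Int.floordiv_eq_ediv_of_pos hcs, PySem.Int.mod_eq_emod_of_pos hcs]
    have hdecomp : total = total / cs * cs + total % cs := by have := Int.emod_add_ediv total cs; nlinarith [this]
    have hq : 0 ≤ total / cs := Int.ediv_nonneg (by omega) (by omega)
    have hr0 : 0 ≤ total % cs := Int.emod_nonneg total (by omega)
    have hrc : total % cs < cs := Int.emod_lt_of_pos total hcs
    have hA := loop_eq_map total cs hcs 0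
    rw [show (0 : Int) * cs = 0 by ring] at hA
    rw [hA]
    have hB := enum_eq_map cs (total / cs) (total % cs) hcs hq hr0 hrc
    rw [← hdecomp] at hB
    rw [hB]
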